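-- pv_equiv track=rewrite | github.com/North-Carolina-Biotechnology-Center/NCBioImpact_Webscraper | Functional Scraper/scrape_and_create_dictionary.py | clean_wordlist
-- ===== SOURCE A (Python) =====
-- def clean_wordlist(excluded_wordlist, exhaustive_wordlist):
--     ''' exclude excluded words & all non-alpha symbols from a list'''
--
--     # empty list to fill with words we want to keep
--     clean_list = []
--
--     for item in exhaustive_wordlist:
--
--         symbols = '!@#$%^&*()_-+={[}]|\\;:"<>?/., '
--
--         # i stands for iterator; iterate the length of symbols string
--         for i in range(0, len(symbols)):
--
--             # if a item contains a symbol, erase the symbol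
--             item = item.replace(symbols[i], '')
--
--         # if an item is not in excluded list, then add to clean list
--         if len(item) > 0 and item not in excluded_wordlist:
--             clean_list.append(item)
--
--     return clean_list
-- ===== SOURCE B (Python) =====
-- def clean_wordlist(excluded_wordlist, exhaustive_wordlist):
--     ''' exclude excluded words & all non-alpha symbols from a list'''
--     symbols = set('!@#$%^&*()_-+={[}]|\\;:"<>?/., ')
--     cleaned_words = (''.join(c for c in w if c not in symbols) for w in exhaustive_wordlist)
--     return [w for w in cleaned_words if w and w not in excluded_wordlist]
-- ===== Notes on version B (the rewrite author's own statement) =====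
-- stated objective: simpler
-- what changed: Replaces A's inner loop over the 30-symbol alphabet (one full string rescan via str.replace per symbol) with a single character pass filtering against a precomputed symbol set, and builds the result as a map-then-filter comprehension instead of an accumulator loop.
import Mathlib
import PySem

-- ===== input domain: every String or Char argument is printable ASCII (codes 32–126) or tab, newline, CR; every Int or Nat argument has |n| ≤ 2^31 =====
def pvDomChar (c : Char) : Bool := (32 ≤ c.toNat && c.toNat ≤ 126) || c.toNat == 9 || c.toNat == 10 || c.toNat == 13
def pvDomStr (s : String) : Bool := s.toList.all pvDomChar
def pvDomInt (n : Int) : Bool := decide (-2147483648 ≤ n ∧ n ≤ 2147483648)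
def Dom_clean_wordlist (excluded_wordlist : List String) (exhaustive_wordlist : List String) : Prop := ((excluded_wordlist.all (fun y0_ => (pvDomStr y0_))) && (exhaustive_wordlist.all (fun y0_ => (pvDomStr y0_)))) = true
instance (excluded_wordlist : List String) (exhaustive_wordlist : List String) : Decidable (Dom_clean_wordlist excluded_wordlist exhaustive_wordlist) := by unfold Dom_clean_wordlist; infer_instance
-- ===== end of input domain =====

-- B replaces A's per-symbol string rescans (one str.replace per symbol) with a single
-- character-filter pass against a symbol set; objective: simpler.


-- ===== PORT A =====
-- the symbols string of A, as its character list
def pvSymbols : List Char := "!@#$%^&*()_-+={[}]|\\;:\"<>?/., ".toList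

-- A's inner loop 'for i in range(0, len(symbols)): item = item.replace(symbols[i], "")':
-- the index loop visits symbols[0..len-1] in order, ported as a fold over those characters,
-- each step doing the same item.replace(symbols[i], '').
def clean_wordlist (excluded_wordlist : List String) (exhaustive_wordlist : List String) : List String :=
  exhaustive_wordlist.foldl
    (fun clean_list item =>
      let item' := pvSymbols.foldl (fun it c => PySem.Chars.replace it [c] []) item.toList
      if 0 < item'.length ∧ ¬ excluded_wordlist.contains (String.ofList item') then
        clean_list ++ [String.ofList item']
      else clean_list)
    []

-- ===== PORT B =====
-- symbols = set('!@#$%^&*()_-+={[}]|\;:"<>?/., ')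
def pvSymbolSet : PySem.Set Char := PySem.Set.ofList pvSymbols

-- cleaned = ''.join(c for c in w if c not in symbols)
def pvClean (w : String) : String :=
  String.ofList (w.toList.filter (fun c => !(pvSymbolSet.contains c)))

-- [w for w in (clean(w) for w in exhaustive) if w and w not in excluded]
-- ('if w': a Python str is truthy iff it is nonempty, i.e. its length is nonzero)
def clean_wordlist_alt (excluded_wordlist : List String) (exhaustive_wordlist : List String) : List String :=
  (exhaustive_wordlist.map pvClean).filter
    (fun w => PySem.Str.len w != 0 && !(excluded_wordlist.contains w))

-- ===== PRECONDITION & SPEC =====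
def Spec_clean_wordlist (excluded_wordlist : List String) (exhaustive_wordlist : List String) (out : List String) : Prop := out = clean_wordlist_alt excluded_wordlist exhaustive_wordlist
instance (excluded_wordlist : List String) (exhaustive_wordlist : List String) (out : List String) : Decidable (Spec_clean_wordlist excluded_wordlist exhaustive_wordlist out) := by unfold Spec_clean_wordlist; infer_instance

-- ===== CLAIM (what is proved, stated in full; the proofs are below) =====
def Claim_equal_clean_wordlist : Prop := ∀ (excluded_wordlist : List String) (exhaustive_wordlist : List String), Dom_clean_wordlist excluded_wordlist exhaustive_wordlist → Spec_clean_wordlist excluded_wordlist exhaustive_wordlist (clean_wordlist excluded_wordlist exhaustive_wordlist)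

-- ===== LEMMAS AND PROOFS =====

-- replace with a single-character needle and empty replacement is a character filter
theorem replace_go_single (c : Char) :
    ∀ (fuel : Nat) (l acc : List Char), l.length ≤ fuel →
      PySem.Chars.replace.go [c] [] fuel l acc =
        acc.reverse ++ l.filter (fun c' => c' ≠ c) := by
  intro fuel
  induction fuel with
  | zero =>
    intro l acc h
    have : l = [] := List.length_eq_zero_iff.mp (Nat.le_zero.mp h)
    subst this
    simp [PySem.Chars.replace.go]
  | succ n ih =>
    intro l acc h
    cases l with
    | nil => simp [PySem.Chars.replace.go]
    | cons c' t =>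
      simp only [PySem.Chars.replace.go]
      by_cases hc : c' = c
      · subst hc
        have hpre : [c'].isPrefixOf (c' :: t) = true := by
          simp [List.isPrefixOf]
        simp only [hpre, if_true]
        have hd : List.drop [c'].length (c' :: t) = t := by simp
        rw [hd]
        simp only [List.reverse_nil, List.nil_append]
        rw [ih t acc (by simpa using Nat.le_of_succ_le_succ h)]
        simp
      · have hpre : [c].isPrefixOf (c' :: t) = false := by
          simp [List.isPrefixOf]
          intro h'; exact hc h'.symm
        simp only [hpre, Bool.false_eq_true, if_false]
        rw [ih t (c' :: acc) (by simpa using Nat.le_of_succ_le_succ h)]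
        simp [hc]

theorem replace_single (c : Char) (w : List Char) :
    PySem.Chars.replace w [c] [] = w.filter (fun c' => c' ≠ c) := by
  simp only [PySem.Chars.replace, List.isEmpty_cons, if_false, Bool.false_eq_true]
  simpa using replace_go_single c w.length w []

-- folding replace over an alphabet of characters is a single filter against that alphabet
theorem foldl_replace_eq_filter (syms : List Char) :
    ∀ (w : List Char),
      syms.foldl (fun it c => PySem.Chars.replace it [c] []) w =
        w.filter (fun c' => !(syms.contains c')) := by
  induction syms with
  | nil => intro w; simp
  | cons s rest ih =>
    intro w
    simp only [List.foldl_cons]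
    rw [replace_single, ih, List.filter_filter]
    congr 1
    funext c'
    simp [eq_comm, Bool.and_comm]

-- building the symbol set does not change membership (the symbols are distinct)
theorem symbolSet_eq : pvSymbolSet = pvSymbols := by decide

-- a cleaned item agrees between the two ports
theorem cleanA_eq_cleanB (item : String) :
    String.ofList (pvSymbols.foldl (fun it c => PySem.Chars.replace it [c] []) item.toList) =
      pvClean item := by
  unfold pvClean
  rw [foldl_replace_eq_filter, symbolSet_eq]
  rfl

-- accumulator loop = map-then-filter
theorem foldl_eq_filter_map (ex : List String) (ws : List String) :
    ∀ (acc : List String),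
      ws.foldl
        (fun clean_list item =>
          let item' := pvSymbols.foldl (fun it c => PySem.Chars.replace it [c] []) item.toList
          if 0 < item'.length ∧ ¬ ex.contains (String.ofList item') then
            clean_list ++ [String.ofList item']
          else clean_list)
        acc =
      acc ++ (ws.map pvClean).filter (fun w => PySem.Str.len w != 0 && !(ex.contains w)) := by
  induction ws with
  | nil => intro acc; simp
  | cons w rest ih =>
    intro acc
    simp only [List.foldl_cons, List.map_cons, List.filter_cons]
    have hA : String.ofList (pvSymbols.foldl (fun it c => PySem.Chars.replace it [c] []) w.toList) =
        pvClean w := cleanA_eq_cleanB w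
    have hlen : (pvSymbols.foldl (fun it c => PySem.Chars.replace it [c] []) w.toList).length =
        (pvClean w).toList.length := by
      rw [← hA]; simp
    have hiff : (0 < (pvClean w).toList.length ∧ ¬ ex.contains (pvClean w) = true) ↔
        ((PySem.Str.len (pvClean w) != 0 && !(ex.contains (pvClean w))) = true) := by
      constructor
      · rintro ⟨a, b⟩
        have hb : ex.contains (pvClean w) = false := by
          cases hx : ex.contains (pvClean w) with
          | true => exact absurd hx b
          | false => rfl
        rw [Bool.and_eq_true]
        refine ⟨?_, ?_⟩
        · rw [bne_iff_ne, PySem.Str.len_eq]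
          omega
        · rw [hb]
          rfl
      · intro hb
        rw [Bool.and_eq_true] at hb
        refine ⟨?_, ?_⟩
        · have h := hb.1
          rw [bne_iff_ne, PySem.Str.len_eq] at h
          omega
        · have h := hb.2
          rw [Bool.not_eq_true'] at h
          simpa using h
    by_cases hcond : (PySem.Str.len (pvClean w) != 0 && !(ex.contains (pvClean w))) = true
    · rw [if_pos (by rw [hlen, hA]; exact hiff.mpr hcond), ih, hA, hcond]
      simp
    · have h0 : (PySem.Str.len (pvClean w) != 0 && !(ex.contains (pvClean w))) = false := by
        cases hx : (PySem.Str.len (pvClean w) != 0 && !(ex.contains (pvClean w))) with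
        | true => exact absurd hx hcond
        | false => rfl
      rw [if_neg (by rw [hlen, hA]; exact fun hh => hcond (hiff.mp hh)), ih, h0]
      simp

-- ===== VERDICT (by name: the statement is the Claim_ definition above) =====
theorem clean_wordlist_spec : Claim_equal_clean_wordlist := by
  intro ex ws _
  unfold Spec_clean_wordlist clean_wordlist clean_wordlist_alt
  simpa using foldl_eq_filter_map ex ws []
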